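-- pv_equiv track=rewrite | github.com/X104n/computer-security | Sem4/INF143A/Oblig2/Oppgave2.py | generate
-- ===== SOURCE A (Python) =====
-- def generate(n):
--     result = ""
--     for k in range(n):
--         if k == 0:
--             result += "1"
--         else:
--             result += "0"
--     return result
-- ===== SOURCE B (Python) =====
-- def generate(n):
--     return "" if n < 1 else "1" + "0" * (n - 1)
-- ===== Notes on version B (the rewrite author's own statement) =====
-- stated objective: simpler
-- what changed: Replaces the per-character accumulation loop with a single closed-form expression: a guard for non-positive n plus one string-repetition concatenated after the leading digit.
import Mathlib
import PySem

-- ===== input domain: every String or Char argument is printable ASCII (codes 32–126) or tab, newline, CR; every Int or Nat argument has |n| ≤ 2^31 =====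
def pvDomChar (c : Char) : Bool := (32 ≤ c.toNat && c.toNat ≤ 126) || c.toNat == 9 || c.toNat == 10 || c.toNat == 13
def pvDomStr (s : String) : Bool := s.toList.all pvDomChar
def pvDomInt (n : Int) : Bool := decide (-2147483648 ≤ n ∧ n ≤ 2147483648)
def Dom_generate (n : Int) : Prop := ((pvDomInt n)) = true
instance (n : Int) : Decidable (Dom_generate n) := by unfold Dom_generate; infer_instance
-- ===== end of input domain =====

-- B replaces A's per-character accumulation loop by a closed-form expression (guard + "1" ++ zeros); same values, simpler structure.

-- ===== PORT A =====
def generate (n : Int) : String :=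
  (PySem.List.pyRange 0 n 1).foldl
    (fun result k => result ++ (if k == 0 then "1" else "0")) ""

-- ===== PORT B =====
def generate_alt (n : Int) : String :=
  if n < 1 then "" else "1" ++ String.ofList (List.replicate (n - 1).toNat '0')

-- ===== PRECONDITION & SPEC =====
def Spec_generate (n : Int) (out : String) : Prop := out = generate_alt n
instance (n : Int) (out : String) : Decidable (Spec_generate n out) := by unfold Spec_generate; infer_instance

-- ===== CLAIM (what is proved, stated in full; the proofs are below) =====
def Claim_equal_generate : Prop := ∀ (n : Int), Dom_generate n → Spec_generate n (generate n)

-- ===== LEMMAS AND PROOFS =====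

theorem generate_loop_nat (m : Nat) :
    (PySem.List.pyRange 0 (m:Int) 1).foldl
      (fun result k => result ++ (if k == 0 then "1" else "0")) ""
    = (if (m:Int) < 1 then "" else "1" ++ String.ofList (List.replicate ((m:Int) - 1).toNat '0')) := by
  induction m with
  | zero => decide
  | succ m ih =>
    have hstep : PySem.List.pyRange 0 ((m:Int) + 1) 1
        = PySem.List.pyRange 0 (m:Int) 1 ++ [(m:Int)] :=
      PySem.List.pyRange_one_succ_right (by omega)
    push_cast
    rw [hstep, List.foldl_append, ih]
    simp only [List.foldl_cons, List.foldl_nil]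
    rcases Nat.eq_zero_or_pos m with hm | hm
    · subst hm; decide
    · have h1 : ¬ ((m:Int) < 1) := by omega
      have h2 : ¬ (((m:Int) + 1) < 1) := by omega
      have h3 : (((m:Int)) == 0) = false := by
        simp only [beq_eq_false_iff_ne, ne_eq]; omega
      rw [if_neg h1, h3]
      have h4 : ((m:Int) + 1 - 1).toNat = ((m:Int) - 1).toNat + 1 := by omega
      rw [h4]
      simp only [Bool.false_eq_true, if_false]
      rw [String.append_assoc]
      congr 1
      have h0 : ("0" : String) = String.ofList ['0'] := rfl
      rw [h0, ← String.ofList_append]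
      congr 1
      rw [← List.replicate_succ']

-- ===== VERDICT (by name: the statement is the Claim_ definition above) =====
theorem generate_spec : Claim_equal_generate := by
  intro n _
  show generate n = generate_alt n
  unfold generate generate_alt
  rcases le_or_gt n 0 with hn | hn
  · rw [PySem.List.pyRange_one_eq_nil (by omega)]
    simp [show n < 1 by omega]
  · have hcast : ((n.toNat : Int)) = n := by omega
    have h := generate_loop_nat n.toNat
    rw [hcast] at h
    exact h
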